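-- pv_equiv track=rewrite | github.com/yhzhao343/brainbraille_decode | src/brainbraille_decode/SVM_Viterbi.py | letter_label_to_transition_label
-- ===== SOURCE A (Python) =====
-- def letter_label_to_transition_label(y, LETTERS_TO_DOT, region_order):
--     dot_label = [
--         [[LETTERS_TO_DOT[l_i][region] for region in region_order] for l_i in run_i]
--         for run_i in y
--     ]
--     transition_label = [
--         [
--             [(prev[i] * 2 + curr[i]) for i in range(len(region_order))]
--             for prev, curr in zip(run_i[0:-1], run_i[1:])
--         ]
--         for run_i in dot_label
--     ]
--     return transition_label
-- ===== SOURCE B (Python) =====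
-- def letter_label_to_transition_label(y, LETTERS_TO_DOT, region_order):
--     cache = {}
--     out = []
--     for run_i in y:
--         rows = []
--         for key in zip(run_i, run_i[1:]):
--             row = cache.get(key)
--             if row is None:
--                 row = [
--                     LETTERS_TO_DOT[key[0]][r] * 2 + LETTERS_TO_DOT[key[1]][r]
--                     for r in region_order
--                 ]
--                 cache[key] = row
--             rows.append(row)
--         out.append(rows)
--     return out
-- ===== Notes on version B (the rewrite author's own statement) =====
-- stated objective: alternative
-- what changed: B drops the materialized dot_label table and instead maintains a memo dict keyed by adjacent letter pairs, computing each distinct transition row once and reusing it for every repeated pair across all runs.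
import Mathlib
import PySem

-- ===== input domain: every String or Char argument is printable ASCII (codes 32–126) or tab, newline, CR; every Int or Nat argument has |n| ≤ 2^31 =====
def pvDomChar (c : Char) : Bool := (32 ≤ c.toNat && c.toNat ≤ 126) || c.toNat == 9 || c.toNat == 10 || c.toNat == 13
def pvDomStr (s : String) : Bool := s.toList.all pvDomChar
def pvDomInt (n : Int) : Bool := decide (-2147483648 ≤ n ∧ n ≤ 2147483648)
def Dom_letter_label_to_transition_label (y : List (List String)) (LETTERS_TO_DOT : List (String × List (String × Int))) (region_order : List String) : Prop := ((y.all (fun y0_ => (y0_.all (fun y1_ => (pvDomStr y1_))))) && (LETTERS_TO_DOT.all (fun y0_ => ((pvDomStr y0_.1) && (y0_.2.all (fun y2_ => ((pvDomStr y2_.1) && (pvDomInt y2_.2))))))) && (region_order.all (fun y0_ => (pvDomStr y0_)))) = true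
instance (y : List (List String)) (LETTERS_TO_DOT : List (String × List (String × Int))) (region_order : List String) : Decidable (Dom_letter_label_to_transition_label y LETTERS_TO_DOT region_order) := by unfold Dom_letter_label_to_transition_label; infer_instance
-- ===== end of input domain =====

-- B replaces A's materialized dot_label table by a memo dict keyed on adjacent letter pairs:
-- each distinct transition row is computed once and reused for repeated pairs across all runs.
-- ===== PORT A =====
def letter_label_to_transition_label (y : List (List String)) (LETTERS_TO_DOT : List (String × List (String × Int))) (region_order : List String) : List (List (List Int)) :=
  let dot_label : List (List (List Int)) :=
    y.map (fun run_i => run_i.map (fun l_i =>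
      region_order.map (fun region =>
        (((LETTERS_TO_DOT.lookup l_i).getD []).lookup region).getD 0)))
  dot_label.map (fun run_i =>
    ((PySem.List.slice run_i (some 0) (some (-1))).zip (PySem.List.slice run_i (some 1) none)).map
      (fun pc =>
        (PySem.List.pyRange 0 (region_order.length : Int) 1).map (fun i =>
          PySem.List.pyGetD pc.1 i 0 * 2 + PySem.List.pyGetD pc.2 i 0)))

-- ===== PORT B =====
-- one cache-lookup-or-compute step of B's inner loop (the body of 'for key in zip(...)')
def pvBStep (LETTERS_TO_DOT : List (String × List (String × Int))) (region_order : List String)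
    (st : PySem.Dict (String × String) (List Int) × List (List Int)) (key : String × String) :
    PySem.Dict (String × String) (List Int) × List (List Int) :=
  match PySem.Dict.get? st.1 key with
  | some row => (st.1, st.2 ++ [row])
  | none =>
      let row := region_order.map (fun r =>
        (((LETTERS_TO_DOT.lookup key.1).getD []).lookup r).getD 0 * 2 +
        (((LETTERS_TO_DOT.lookup key.2).getD []).lookup r).getD 0)
      (PySem.Dict.insert st.1 key row, st.2 ++ [row])

def letter_label_to_transition_label_alt (y : List (List String)) (LETTERS_TO_DOT : List (String × List (String × Int))) (region_order : List String) : List (List (List Int)) :=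
  let fin := y.foldl (fun st run_i =>
      let inner := (run_i.zip (PySem.List.slice run_i (some 1) none)).foldl
        (pvBStep LETTERS_TO_DOT region_order) (st.1, [])
      (inner.1, st.2 ++ [inner.2]))
    ((PySem.Dict.empty : PySem.Dict (String × String) (List Int)), [])
  fin.2

-- ===== PRECONDITION & SPEC =====
-- helper: the letter's dict exists and has every region of region_order
def pvLetterOK (LETTERS_TO_DOT : List (String × List (String × Int))) (region_order : List String) (l : String) : Bool :=
  match LETTERS_TO_DOT.lookup l with
  | none => false
  | some d => region_order.all (fun r => (d.lookup r).isSome)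

-- Pre_ excludes exactly the inputs where Python A raises KeyError: region_order is non-empty and
-- some letter of some run is missing from LETTERS_TO_DOT or its dict is missing some region.
def Pre_letter_label_to_transition_label (y : List (List String)) (LETTERS_TO_DOT : List (String × List (String × Int))) (region_order : List String) : Prop :=
  region_order = [] ∨ (y.all (fun run_i => run_i.all (pvLetterOK LETTERS_TO_DOT region_order))) = true
instance (y : List (List String)) (LETTERS_TO_DOT : List (String × List (String × Int))) (region_order : List String) : Decidable (Pre_letter_label_to_transition_label y LETTERS_TO_DOT region_order) := by unfold Pre_letter_label_to_transition_label; infer_instance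
def pvWitness_letter_label_to_transition_label : List (List String) × (List (String × List (String × Int))) × List String :=
  ([["a", "b"], ["b"]], [("a", [("r", 1), ("s", 0)]), ("b", [("r", 0), ("s", 1)])], ["r", "s"])

def Spec_letter_label_to_transition_label (y : List (List String)) (LETTERS_TO_DOT : List (String × List (String × Int))) (region_order : List String) (out : List (List (List Int))) : Prop := out = letter_label_to_transition_label_alt y LETTERS_TO_DOT region_order
instance (y : List (List String)) (LETTERS_TO_DOT : List (String × List (String × Int))) (region_order : List String) (out : List (List (List Int))) : Decidable (Spec_letter_label_to_transition_label y LETTERS_TO_DOT region_order out) := by unfold Spec_letter_label_to_transition_label; infer_instance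

-- ===== CLAIM (what is proved, stated in full; the proofs are below) =====
def Claim_equal_letter_label_to_transition_label : Prop := ∀ (y : List (List String)) (LETTERS_TO_DOT : List (String × List (String × Int))) (region_order : List String), Dom_letter_label_to_transition_label y LETTERS_TO_DOT region_order → Pre_letter_label_to_transition_label y LETTERS_TO_DOT region_order → Spec_letter_label_to_transition_label y LETTERS_TO_DOT region_order (letter_label_to_transition_label y LETTERS_TO_DOT region_order)

-- ===== LEMMAS AND PROOFS =====
-- the row B computes for a pair of letters
def pvRow (L : List (String × List (String × Int))) (ro : List String) (k : String × String) : List Int :=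
  ro.map (fun r =>
    (((L.lookup k.1).getD []).lookup r).getD 0 * 2 + (((L.lookup k.2).getD []).lookup r).getD 0)

-- cache invariant: every cached value is the row of its key
def pvInv (L : List (String × List (String × Int))) (ro : List String)
    (c : PySem.Dict (String × String) (List Int)) : Prop :=
  ∀ k v, PySem.Dict.get? c k = some v → v = pvRow L ro k

lemma pvInv_empty (L : List (String × List (String × Int))) (ro : List String) :
    pvInv L ro PySem.Dict.empty := by
  intro k v h; simp [PySem.Dict.get?_empty] at h

lemma pvBStep_eq (L : List (String × List (String × Int))) (ro : List String)
    (c : PySem.Dict (String × String) (List Int)) (acc : List (List Int)) (k : String × String)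
    (hinv : pvInv L ro c) :
    (pvBStep L ro (c, acc) k).2 = acc ++ [pvRow L ro k] ∧ pvInv L ro (pvBStep L ro (c, acc) k).1 := by
  unfold pvBStep
  cases h : PySem.Dict.get? c k with
  | some row =>
      simp only []
      exact ⟨by rw [hinv k row h], hinv⟩
  | none =>
      refine ⟨rfl, ?_⟩
      intro k' v' h'
      by_cases hk : k' = k
      · subst hk
        rw [PySem.Dict.get?_insert_self] at h'
        exact (Option.some.injEq _ _ ▸ h').symm ▸ rfl
      · rw [PySem.Dict.get?_insert_of_ne (hne := hk)] at h'
        exact hinv k' v' h'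

lemma pvFold_inner (L : List (String × List (String × Int))) (ro : List String)
    (ks : List (String × String)) :
    ∀ (c : PySem.Dict (String × String) (List Int)) (acc : List (List Int)), pvInv L ro c →
    (ks.foldl (pvBStep L ro) (c, acc)).2 = acc ++ ks.map (pvRow L ro) ∧
      pvInv L ro (ks.foldl (pvBStep L ro) (c, acc)).1 := by
  induction ks with
  | nil => intro c acc h; exact ⟨by simp, h⟩
  | cons k ks ih =>
      intro c acc h
      obtain ⟨h1, h2⟩ := pvBStep_eq L ro c acc k h
      simp only [List.foldl_cons]
      obtain ⟨h3, h4⟩ := ih (pvBStep L ro (c, acc) k).1 (pvBStep L ro (c, acc) k).2 h2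
      constructor
      · rw [← Prod.mk.eta (p := pvBStep L ro (c, acc) k)] at h3 ⊢
        rw [h3, h1]; simp
      · rw [← Prod.mk.eta (p := pvBStep L ro (c, acc) k)] at h4 ⊢
        exact h4

lemma pvFold_outer (L : List (String × List (String × Int))) (ro : List String)
    (y : List (List String)) :
    ∀ (c : PySem.Dict (String × String) (List Int)) (out : List (List (List Int))), pvInv L ro c →
    (y.foldl (fun st run_i =>
        let inner := (run_i.zip (PySem.List.slice run_i (some 1) none)).foldl (pvBStep L ro) (st.1, [])
        (inner.1, st.2 ++ [inner.2])) (c, out)).2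
      = out ++ y.map (fun run_i => (run_i.zip (PySem.List.slice run_i (some 1) none)).map (pvRow L ro)) := by
  induction y with
  | nil => intro c out h; simp
  | cons run ys ih =>
      intro c out h
      obtain ⟨h1, h2⟩ := pvFold_inner L ro (run.zip (PySem.List.slice run (some 1) none)) c [] h
      simp only [List.foldl_cons]
      rw [ih _ _ h2, h1]
      simp

-- B's result in closed form
lemma alt_eq (y : List (List String)) (L : List (String × List (String × Int))) (ro : List String) :
    letter_label_to_transition_label_alt y L ro
      = y.map (fun run_i => (run_i.zip (PySem.List.slice run_i (some 1) none)).map (pvRow L ro)) := by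
  unfold letter_label_to_transition_label_alt
  have := pvFold_outer L ro y PySem.Dict.empty [] (pvInv_empty L ro)
  simpa using this

-- zip of a list with its tail equals zip of its dropLast with its tail (zip truncates)
lemma zip_dropLast_tail {α : Type} (l : List α) : l.dropLast.zip l.tail = l.zip l.tail := by
  match l with
  | [] => rfl
  | [a] => rfl
  | a :: b :: t =>
    show (a, b) :: (List.dropLast (b :: t)).zip t = (a, b) :: (b :: t).zip t
    have := zip_dropLast_tail (b :: t)
    simpa using this

-- the index-based inner comprehension over two mapped rows is the direct per-region map
lemma inner_eq (ro : List String) (g h : String → Int) :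
    (PySem.List.pyRange 0 (ro.length : Int) 1).map (fun i =>
      PySem.List.pyGetD (ro.map g) i 0 * 2 + PySem.List.pyGetD (ro.map h) i 0)
    = ro.map (fun r => g r * 2 + h r) := by
  rw [PySem.List.pyRange_zero_natCast, List.map_map]
  apply List.ext_getElem
  · simp
  · intro k hk hk2
    simp only [List.getElem_map, List.getElem_range, Function.comp]
    rw [PySem.List.pyGetD_natCast, PySem.List.pyGetD_natCast]
    simp at hk
    rw [List.getD_eq_getElem _ _ (by simpa using hk), List.getD_eq_getElem _ _ (by simpa using hk)]
    simp

-- ===== VERDICT (by name: the statement is the Claim_ definition above) =====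
theorem letter_label_to_transition_label_spec : Claim_equal_letter_label_to_transition_label := by
  intro y L ro _ _
  unfold Spec_letter_label_to_transition_label letter_label_to_transition_label
  rw [alt_eq]
  simp only [List.map_map, PySem.List.slice_zero_start, PySem.List.slice_to_neg_one,
    PySem.List.slice_from_one]
  apply List.map_congr_left
  intro run _
  simp only [Function.comp]
  rw [← List.map_tail, ← List.map_dropLast, List.zip_map, zip_dropLast_tail, List.map_map]
  apply List.map_congr_left
  intro pc _
  exact inner_eq ro _ _
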